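-- pv_equiv track=rewrite | github.com/Raghad034-acc/QadderSystem | qadder-backend/app/services/step2_damage_location.py | orientation_from_parts
-- ===== SOURCE A (Python) =====
-- def orientation_from_parts(parts: list[str]) -> str:
--     """Infer car orientation from detected parts."""
--
--     p = set(str(x).strip().lower() for x in parts)
--
--     rear_keywords = {
--         "trunk",
--         "back_bumper",
--         "tailgate",
--         "back_left_light",
--         "back_right_light",
--         "back_glass",
--     }
--
--     front_keywords = {
--         "hood",
--         "front_bumper",
--         "front_left_light",
--         "front_right_light",
--         "front_glass",
--     }
--
--     rear_score = sum(1 for k in rear_keywords if k in p)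
--     front_score = sum(1 for k in front_keywords if k in p)
--
--     left_score = 1 if "left_mirror" in p else 0
--     right_score = 1 if "right_mirror" in p else 0
--
--     if rear_score >= 2 and rear_score > front_score:
--         return "rear"
--
--     if front_score >= 2 and front_score > rear_score:
--         return "front"
--
--     if left_score == 1 and right_score == 0:
--         return "left"
--
--     if right_score == 1 and left_score == 0:
--         return "right"
--
--     return "unknown"
-- ===== SOURCE B (Python) =====
-- _KEYWORDS = [
--     "trunk", "back_bumper", "tailgate", "back_left_light",
--     "back_right_light", "back_glass",
--     "hood", "front_bumper", "front_left_light", "front_right_light",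
--     "front_glass",
--     "left_mirror", "right_mirror",
-- ]
-- KEYWORD_MASK = {kw: 1 << i for i, kw in enumerate(_KEYWORDS)}
--
--
-- def orientation_from_parts(parts: list[str]) -> str:
--     """Infer car orientation from detected parts (bitmask accumulator)."""
--     mask = 0
--     for x in parts:
--         mask |= KEYWORD_MASK.get(str(x).strip().lower(), 0)
--     rear = (mask & 0x3F).bit_count()
--     front = ((mask >> 6) & 0x1F).bit_count()
--     left = (mask >> 11) & 1
--     right = (mask >> 12) & 1
--     if max(rear, front) >= 2 and rear != front:
--         return "rear" if rear > front else "front"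
--     if left != right:
--         return "left" if left else "right"
--     return "unknown"
-- ===== Notes on version B (the rewrite author's own statement) =====
-- stated objective: alternative
-- what changed: Replaces A's normalized-set plus four per-category membership-scan sums with a single bitmask accumulator (one OR per part via a keyword-to-bit dict, dedup implicit in the bits), scores read off by popcount/bit extraction, and a restructured max/xor decision instead of A's four-branch if-chain.
import Mathlib
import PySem

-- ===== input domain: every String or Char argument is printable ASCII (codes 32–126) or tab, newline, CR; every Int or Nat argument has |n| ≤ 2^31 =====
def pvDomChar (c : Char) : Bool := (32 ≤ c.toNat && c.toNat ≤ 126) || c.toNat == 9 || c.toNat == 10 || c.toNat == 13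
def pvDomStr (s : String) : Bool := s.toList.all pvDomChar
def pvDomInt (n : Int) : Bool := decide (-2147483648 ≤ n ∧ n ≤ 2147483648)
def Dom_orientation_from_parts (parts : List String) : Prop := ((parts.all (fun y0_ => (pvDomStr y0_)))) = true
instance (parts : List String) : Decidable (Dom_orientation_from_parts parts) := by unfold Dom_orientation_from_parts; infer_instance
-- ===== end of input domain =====

-- B replaces A's normalized set plus four per-category membership-scan sums with a single
-- bitmask accumulator folded over the raw parts (one keyword→bit dict lookup + OR per part,
-- dedup implicit in the bits), scores read off by popcount/bit extraction, and a
-- restructured max/xor decision (objective: alternative).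

-- ===== PORT A =====
def orientation_from_parts (parts : List String) : String :=
  let p : PySem.Set String :=
    PySem.Set.ofList (parts.map (fun x => PySem.Str.lower (PySem.Str.strip x)))
  let rear_keywords : PySem.Set String :=
    PySem.Set.ofList ["trunk", "back_bumper", "tailgate", "back_left_light", "back_right_light", "back_glass"]
  let front_keywords : PySem.Set String :=
    PySem.Set.ofList ["hood", "front_bumper", "front_left_light", "front_right_light", "front_glass"]
  -- sum(1 for k in K if k in p): an order-independent count over the set K
  let rear_score : Int := ((rear_keywords.filter (fun k => PySem.Set.contains p k)).length : Int)
  let front_score : Int := ((front_keywords.filter (fun k => PySem.Set.contains p k)).length : Int)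
  let left_score : Int := if PySem.Set.contains p "left_mirror" then 1 else 0
  let right_score : Int := if PySem.Set.contains p "right_mirror" then 1 else 0
  if 2 ≤ rear_score ∧ front_score < rear_score then "rear"
  else if 2 ≤ front_score ∧ rear_score < front_score then "front"
  else if left_score = 1 ∧ right_score = 0 then "left"
  else if right_score = 1 ∧ left_score = 0 then "right"
  else "unknown"

-- ===== PORT B =====
-- KEYWORD_MASK = {kw: 1 << i for i, kw in enumerate(_KEYWORDS)}, written out
def KEYWORD_MASK : PySem.Dict String Int := PySem.Dict.ofList
  [("trunk", 1), ("back_bumper", 2), ("tailgate", 4), ("back_left_light", 8),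
   ("back_right_light", 16), ("back_glass", 32),
   ("hood", 64), ("front_bumper", 128), ("front_left_light", 256),
   ("front_right_light", 512), ("front_glass", 1024),
   ("left_mirror", 2048), ("right_mirror", 4096)]

-- mask is a set of bits built by OR; `.bit_count()` is PySem.Int.bitCount (a Nat: the
-- Python ints rear/front are nonneg and only compared, so Nat comparisons are exact here)
def orientation_from_parts_alt (parts : List String) : String :=
  let mask : Int := parts.foldl (fun m x =>
    PySem.Int.bor m (PySem.Dict.getD KEYWORD_MASK (PySem.Str.lower (PySem.Str.strip x)) 0)) 0
  let rear : Nat := PySem.Int.bitCount (PySem.Int.band mask 63)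
  let front : Nat := PySem.Int.bitCount (PySem.Int.band (mask >>> (6 : Nat)) 31)
  let left : Int := PySem.Int.band (mask >>> (11 : Nat)) 1
  let right : Int := PySem.Int.band (mask >>> (12 : Nat)) 1
  if 2 ≤ max rear front ∧ rear ≠ front then (if front < rear then "rear" else "front")
  else if left ≠ right then (if left ≠ 0 then "left" else "right")
  else "unknown"

-- ===== PRECONDITION & SPEC =====
def Spec_orientation_from_parts (parts : List String) (out : String) : Prop := out = orientation_from_parts_alt parts
instance (parts : List String) (out : String) : Decidable (Spec_orientation_from_parts parts out) := by unfold Spec_orientation_from_parts; infer_instance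

-- ===== CLAIM (what is proved, stated in full; the proofs are below) =====
def Claim_equal_orientation_from_parts : Prop := ∀ (parts : List String), Dom_orientation_from_parts parts → Spec_orientation_from_parts parts (orientation_from_parts parts)

-- ===== LEMMAS AND PROOFS =====

-- proof-side mirror of KEYWORD_MASK as a Nat-valued if-chain
def natLookup (y : String) : Nat :=
  if y = "trunk" then 1
  else if y = "back_bumper" then 2
  else if y = "tailgate" then 4
  else if y = "back_left_light" then 8
  else if y = "back_right_light" then 16
  else if y = "back_glass" then 32
  else if y = "hood" then 64
  else if y = "front_bumper" then 128
  else if y = "front_left_light" then 256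
  else if y = "front_right_light" then 512
  else if y = "front_glass" then 1024
  else if y = "left_mirror" then 2048
  else if y = "right_mirror" then 4096
  else 0

-- did any element of l normalize to kw?
def hits (l : List String) (kw : String) : Bool :=
  l.any (fun x => PySem.Str.lower (PySem.Str.strip x) == kw)

-- the Nat shadow of B's fold
def natMask (l : List String) : Nat :=
  l.foldl (fun a x => a ||| natLookup (PySem.Str.lower (PySem.Str.strip x))) 0

-- the 6- and 5-bit reassembly functions
def m6 (b1 b2 b3 b4 b5 b6 : Bool) : Nat :=
  cond b1 1 0 + cond b2 2 0 + cond b3 4 0 + cond b4 8 0 + cond b5 16 0 + cond b6 32 0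
def m5 (b1 b2 b3 b4 b5 : Bool) : Nat :=
  cond b1 1 0 + cond b2 2 0 + cond b3 4 0 + cond b4 8 0 + cond b5 16 0

set_option maxHeartbeats 1000000 in
lemma getD_eval (y : String) :
    PySem.Dict.getD KEYWORD_MASK y 0 = (natLookup y : Int) := by
  unfold natLookup
  by_cases h1 : y = "trunk"
  · rw [if_pos h1]; subst h1; decide
  rw [if_neg h1]
  by_cases h2 : y = "back_bumper"
  · rw [if_pos h2]; subst h2; decide
  rw [if_neg h2]
  by_cases h3 : y = "tailgate"
  · rw [if_pos h3]; subst h3; decide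
  rw [if_neg h3]
  by_cases h4 : y = "back_left_light"
  · rw [if_pos h4]; subst h4; decide
  rw [if_neg h4]
  by_cases h5 : y = "back_right_light"
  · rw [if_pos h5]; subst h5; decide
  rw [if_neg h5]
  by_cases h6 : y = "back_glass"
  · rw [if_pos h6]; subst h6; decide
  rw [if_neg h6]
  by_cases h7 : y = "hood"
  · rw [if_pos h7]; subst h7; decide
  rw [if_neg h7]
  by_cases h8 : y = "front_bumper"
  · rw [if_pos h8]; subst h8; decide
  rw [if_neg h8]
  by_cases h9 : y = "front_left_light"
  · rw [if_pos h9]; subst h9; decide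
  rw [if_neg h9]
  by_cases h10 : y = "front_right_light"
  · rw [if_pos h10]; subst h10; decide
  rw [if_neg h10]
  by_cases h11 : y = "front_glass"
  · rw [if_pos h11]; subst h11; decide
  rw [if_neg h11]
  by_cases h12 : y = "left_mirror"
  · rw [if_pos h12]; subst h12; decide
  rw [if_neg h12]
  by_cases h13 : y = "right_mirror"
  · rw [if_pos h13]; subst h13; decide
  rw [if_neg h13]
  rw [PySem.Dict.getD_eq_get?_getD]
  have hn : KEYWORD_MASK.get? y = none := by
    rw [PySem.Dict.get?_eq_none_iff_not_mem_keys,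
      show KEYWORD_MASK.keys = ["trunk", "back_bumper", "tailgate", "back_left_light", "back_right_light", "back_glass", "hood", "front_bumper", "front_left_light", "front_right_light", "front_glass", "left_mirror", "right_mirror"] by decide]
    simp [h1, h2, h3, h4, h5, h6, h7, h8, h9, h10, h11, h12, h13]
  rw [hn]; rfl

lemma mask_cast_aux (l : List String) (m : Nat) :
    l.foldl (fun a x =>
      PySem.Int.bor a (PySem.Dict.getD KEYWORD_MASK (PySem.Str.lower (PySem.Str.strip x)) 0)) (m : Int)
    = ((l.foldl (fun a x => a ||| natLookup (PySem.Str.lower (PySem.Str.strip x))) m : Nat) : Int) := by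
  induction l generalizing m with
  | nil => simp
  | cons x l ih =>
    rw [List.foldl_cons, getD_eval, PySem.Int.bor_natCast]
    exact ih _

lemma foldl_or_testBit (l : List String) (m : Nat) (i : Nat) :
    (l.foldl (fun a x => a ||| natLookup (PySem.Str.lower (PySem.Str.strip x))) m).testBit i
    = (m.testBit i || l.any (fun x => (natLookup (PySem.Str.lower (PySem.Str.strip x))).testBit i)) := by
  induction l generalizing m with
  | nil => simp
  | cons x l ih =>
    rw [List.foldl_cons, ih, List.any_cons, Nat.testBit_or, Bool.or_assoc]














set_option maxHeartbeats 1000000 in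
lemma lookup_bits (y : String) :
    ((natLookup y).testBit 0 = (y == "trunk")) ∧
    ((natLookup y).testBit 1 = (y == "back_bumper")) ∧
    ((natLookup y).testBit 2 = (y == "tailgate")) ∧
    ((natLookup y).testBit 3 = (y == "back_left_light")) ∧
    ((natLookup y).testBit 4 = (y == "back_right_light")) ∧
    ((natLookup y).testBit 5 = (y == "back_glass")) ∧
    ((natLookup y).testBit 6 = (y == "hood")) ∧
    ((natLookup y).testBit 7 = (y == "front_bumper")) ∧
    ((natLookup y).testBit 8 = (y == "front_left_light")) ∧
    ((natLookup y).testBit 9 = (y == "front_right_light")) ∧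
    ((natLookup y).testBit 10 = (y == "front_glass")) ∧
    ((natLookup y).testBit 11 = (y == "left_mirror")) ∧
    ((natLookup y).testBit 12 = (y == "right_mirror")) := by
  by_cases h1 : y = "trunk"
  · subst h1; decide
  by_cases h2 : y = "back_bumper"
  · subst h2; decide
  by_cases h3 : y = "tailgate"
  · subst h3; decide
  by_cases h4 : y = "back_left_light"
  · subst h4; decide
  by_cases h5 : y = "back_right_light"
  · subst h5; decide
  by_cases h6 : y = "back_glass"
  · subst h6; decide
  by_cases h7 : y = "hood"
  · subst h7; decide
  by_cases h8 : y = "front_bumper"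
  · subst h8; decide
  by_cases h9 : y = "front_left_light"
  · subst h9; decide
  by_cases h10 : y = "front_right_light"
  · subst h10; decide
  by_cases h11 : y = "front_glass"
  · subst h11; decide
  by_cases h12 : y = "left_mirror"
  · subst h12; decide
  by_cases h13 : y = "right_mirror"
  · subst h13; decide
  have h0 : natLookup y = 0 := by
    unfold natLookup
    rw [if_neg h1, if_neg h2, if_neg h3, if_neg h4, if_neg h5, if_neg h6, if_neg h7, if_neg h8, if_neg h9, if_neg h10, if_neg h11, if_neg h12, if_neg h13]
  simp [h0, h1, h2, h3, h4, h5, h6, h7, h8, h9, h10, h11, h12, h13]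

lemma lookup_bit0 (y : String) : (natLookup y).testBit 0 = (y == "trunk") := (lookup_bits y).1
lemma lookup_bit1 (y : String) : (natLookup y).testBit 1 = (y == "back_bumper") := (lookup_bits y).2.1
lemma lookup_bit2 (y : String) : (natLookup y).testBit 2 = (y == "tailgate") := (lookup_bits y).2.2.1
lemma lookup_bit3 (y : String) : (natLookup y).testBit 3 = (y == "back_left_light") := (lookup_bits y).2.2.2.1
lemma lookup_bit4 (y : String) : (natLookup y).testBit 4 = (y == "back_right_light") := (lookup_bits y).2.2.2.2.1
lemma lookup_bit5 (y : String) : (natLookup y).testBit 5 = (y == "back_glass") := (lookup_bits y).2.2.2.2.2.1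
lemma lookup_bit6 (y : String) : (natLookup y).testBit 6 = (y == "hood") := (lookup_bits y).2.2.2.2.2.2.1
lemma lookup_bit7 (y : String) : (natLookup y).testBit 7 = (y == "front_bumper") := (lookup_bits y).2.2.2.2.2.2.2.1
lemma lookup_bit8 (y : String) : (natLookup y).testBit 8 = (y == "front_left_light") := (lookup_bits y).2.2.2.2.2.2.2.2.1
lemma lookup_bit9 (y : String) : (natLookup y).testBit 9 = (y == "front_right_light") := (lookup_bits y).2.2.2.2.2.2.2.2.2.1
lemma lookup_bit10 (y : String) : (natLookup y).testBit 10 = (y == "front_glass") := (lookup_bits y).2.2.2.2.2.2.2.2.2.2.1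
lemma lookup_bit11 (y : String) : (natLookup y).testBit 11 = (y == "left_mirror") := (lookup_bits y).2.2.2.2.2.2.2.2.2.2.2.1
lemma lookup_bit12 (y : String) : (natLookup y).testBit 12 = (y == "right_mirror") := (lookup_bits y).2.2.2.2.2.2.2.2.2.2.2.2

lemma contains_ofList_map (l : List String) (f : String → String) (k : String) :
    PySem.Set.contains (PySem.Set.ofList (l.map f)) k = l.any (fun x => f x == k) := by
  rw [Bool.eq_iff_iff]
  simp

lemma maskBit0 (l : List String) : (natMask l).testBit 0 = hits l "trunk" := by
  unfold natMask hits
  rw [foldl_or_testBit]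
  simp only [Nat.zero_testBit, Bool.false_or, lookup_bit0]

lemma maskBit1 (l : List String) : (natMask l).testBit 1 = hits l "back_bumper" := by
  unfold natMask hits
  rw [foldl_or_testBit]
  simp only [Nat.zero_testBit, Bool.false_or, lookup_bit1]

lemma maskBit2 (l : List String) : (natMask l).testBit 2 = hits l "tailgate" := by
  unfold natMask hits
  rw [foldl_or_testBit]
  simp only [Nat.zero_testBit, Bool.false_or, lookup_bit2]

lemma maskBit3 (l : List String) : (natMask l).testBit 3 = hits l "back_left_light" := by
  unfold natMask hits
  rw [foldl_or_testBit]
  simp only [Nat.zero_testBit, Bool.false_or, lookup_bit3]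

lemma maskBit4 (l : List String) : (natMask l).testBit 4 = hits l "back_right_light" := by
  unfold natMask hits
  rw [foldl_or_testBit]
  simp only [Nat.zero_testBit, Bool.false_or, lookup_bit4]

lemma maskBit5 (l : List String) : (natMask l).testBit 5 = hits l "back_glass" := by
  unfold natMask hits
  rw [foldl_or_testBit]
  simp only [Nat.zero_testBit, Bool.false_or, lookup_bit5]

lemma maskBit6 (l : List String) : (natMask l).testBit 6 = hits l "hood" := by
  unfold natMask hits
  rw [foldl_or_testBit]
  simp only [Nat.zero_testBit, Bool.false_or, lookup_bit6]

lemma maskBit7 (l : List String) : (natMask l).testBit 7 = hits l "front_bumper" := by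
  unfold natMask hits
  rw [foldl_or_testBit]
  simp only [Nat.zero_testBit, Bool.false_or, lookup_bit7]

lemma maskBit8 (l : List String) : (natMask l).testBit 8 = hits l "front_left_light" := by
  unfold natMask hits
  rw [foldl_or_testBit]
  simp only [Nat.zero_testBit, Bool.false_or, lookup_bit8]

lemma maskBit9 (l : List String) : (natMask l).testBit 9 = hits l "front_right_light" := by
  unfold natMask hits
  rw [foldl_or_testBit]
  simp only [Nat.zero_testBit, Bool.false_or, lookup_bit9]

lemma maskBit10 (l : List String) : (natMask l).testBit 10 = hits l "front_glass" := by
  unfold natMask hits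
  rw [foldl_or_testBit]
  simp only [Nat.zero_testBit, Bool.false_or, lookup_bit10]

lemma maskBit11 (l : List String) : (natMask l).testBit 11 = hits l "left_mirror" := by
  unfold natMask hits
  rw [foldl_or_testBit]
  simp only [Nat.zero_testBit, Bool.false_or, lookup_bit11]

lemma maskBit12 (l : List String) : (natMask l).testBit 12 = hits l "right_mirror" := by
  unfold natMask hits
  rw [foldl_or_testBit]
  simp only [Nat.zero_testBit, Bool.false_or, lookup_bit12]

lemma m6_lt : ∀ b1 b2 b3 b4 b5 b6 : Bool, m6 b1 b2 b3 b4 b5 b6 < 64 := by decide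
lemma m5_lt : ∀ b1 b2 b3 b4 b5 : Bool, m5 b1 b2 b3 b4 b5 < 32 := by decide
lemma m6_bit0 : ∀ b1 b2 b3 b4 b5 b6 : Bool, (m6 b1 b2 b3 b4 b5 b6).testBit 0 = b1 := by decide
lemma m6_bit1 : ∀ b1 b2 b3 b4 b5 b6 : Bool, (m6 b1 b2 b3 b4 b5 b6).testBit 1 = b2 := by decide
lemma m6_bit2 : ∀ b1 b2 b3 b4 b5 b6 : Bool, (m6 b1 b2 b3 b4 b5 b6).testBit 2 = b3 := by decide
lemma m6_bit3 : ∀ b1 b2 b3 b4 b5 b6 : Bool, (m6 b1 b2 b3 b4 b5 b6).testBit 3 = b4 := by decide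
lemma m6_bit4 : ∀ b1 b2 b3 b4 b5 b6 : Bool, (m6 b1 b2 b3 b4 b5 b6).testBit 4 = b5 := by decide
lemma m6_bit5 : ∀ b1 b2 b3 b4 b5 b6 : Bool, (m6 b1 b2 b3 b4 b5 b6).testBit 5 = b6 := by decide
lemma m5_bit0 : ∀ b1 b2 b3 b4 b5 : Bool, (m5 b1 b2 b3 b4 b5).testBit 0 = b1 := by decide
lemma m5_bit1 : ∀ b1 b2 b3 b4 b5 : Bool, (m5 b1 b2 b3 b4 b5).testBit 1 = b2 := by decide
lemma m5_bit2 : ∀ b1 b2 b3 b4 b5 : Bool, (m5 b1 b2 b3 b4 b5).testBit 2 = b3 := by decide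
lemma m5_bit3 : ∀ b1 b2 b3 b4 b5 : Bool, (m5 b1 b2 b3 b4 b5).testBit 3 = b4 := by decide
lemma m5_bit4 : ∀ b1 b2 b3 b4 b5 : Bool, (m5 b1 b2 b3 b4 b5).testBit 4 = b5 := by decide
lemma cond_bit0 : ∀ b : Bool, (cond b 1 0 : Nat).testBit 0 = b := by decide
lemma cond_lt : ∀ b : Bool, (cond b 1 0 : Nat) < 2 := by decide

lemma band63 (l : List String) :
    natMask l &&& 63 = m6 (hits l "trunk") (hits l "back_bumper") (hits l "tailgate")
      (hits l "back_left_light") (hits l "back_right_light") (hits l "back_glass") := by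
  apply Nat.eq_of_testBit_eq
  intro i
  rw [Nat.testBit_and, show (63 : Nat) = 2 ^ 6 - 1 from rfl, Nat.testBit_two_pow_sub_one]
  by_cases hi : i < 6
  · interval_cases i
    · rw [maskBit0, m6_bit0]; simp
    · rw [maskBit1, m6_bit1]; simp
    · rw [maskBit2, m6_bit2]; simp
    · rw [maskBit3, m6_bit3]; simp
    · rw [maskBit4, m6_bit4]; simp
    · rw [maskBit5, m6_bit5]; simp
  · rw [decide_eq_false hi, Bool.and_false]
    symm
    apply Nat.testBit_lt_two_pow
    calc m6 _ _ _ _ _ _ < 64 := m6_lt _ _ _ _ _ _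
      _ = 2 ^ 6 := by norm_num
      _ ≤ 2 ^ i := Nat.pow_le_pow_right (by norm_num) (by omega)

lemma band31 (l : List String) :
    (natMask l >>> 6) &&& 31 = m5 (hits l "hood") (hits l "front_bumper")
      (hits l "front_left_light") (hits l "front_right_light") (hits l "front_glass") := by
  apply Nat.eq_of_testBit_eq
  intro i
  rw [Nat.testBit_and, Nat.testBit_shiftRight, show (31 : Nat) = 2 ^ 5 - 1 from rfl,
    Nat.testBit_two_pow_sub_one]
  by_cases hi : i < 5
  · interval_cases i
    · rw [show 6 + 0 = 6 from rfl, maskBit6, m5_bit0]; simp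
    · rw [show 6 + 1 = 7 from rfl, maskBit7, m5_bit1]; simp
    · rw [show 6 + 2 = 8 from rfl, maskBit8, m5_bit2]; simp
    · rw [show 6 + 3 = 9 from rfl, maskBit9, m5_bit3]; simp
    · rw [show 6 + 4 = 10 from rfl, maskBit10, m5_bit4]; simp
  · rw [decide_eq_false hi, Bool.and_false]
    symm
    apply Nat.testBit_lt_two_pow
    calc m5 _ _ _ _ _ < 32 := m5_lt _ _ _ _ _
      _ = 2 ^ 5 := by norm_num
      _ ≤ 2 ^ i := Nat.pow_le_pow_right (by norm_num) (by omega)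

lemma band1 (l : List String) (k : Nat) (kw : String) (h : (natMask l).testBit k = hits l kw) :
    (natMask l >>> k) &&& 1 = cond (hits l kw) 1 0 := by
  apply Nat.eq_of_testBit_eq
  intro i
  rw [Nat.testBit_and, Nat.testBit_shiftRight,
    show (1 : Nat).testBit i = decide (i < 1) from by
      simpa using Nat.testBit_two_pow_sub_one 1 i]
  by_cases hi : i < 1
  · have h0 : i = 0 := by omega
    subst h0
    rw [Nat.add_zero, h, cond_bit0]
    simp
  · rw [decide_eq_false hi, Bool.and_false]
    symm
    apply Nat.testBit_lt_two_pow
    calc cond (hits l kw) 1 0 < 2 := cond_lt _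
      _ = 2 ^ 1 := by norm_num
      _ ≤ 2 ^ i := Nat.pow_le_pow_right (by norm_num) (by omega)

lemma cast_shiftRight (n k : Nat) : ((n : Nat) : Int) >>> k = ((n >>> k : Nat) : Int) := by
  simp [Int.natCast_shiftRight]

lemma len6 (q : String → Bool) (w1 w2 w3 w4 w5 w6 : String) :
    ([w1, w2, w3, w4, w5, w6].filter q).length
    = PySem.Int.bitCount ((m6 (q w1) (q w2) (q w3) (q w4) (q w5) (q w6) : Nat) : Int) := by
  cases h1 : q w1 <;> cases h2 : q w2 <;> cases h3 : q w3 <;> cases h4 : q w4 <;>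
    cases h5 : q w5 <;> cases h6 : q w6 <;>
      simp [h1, h2, h3, h4, h5, h6, m6] <;> decide

lemma len5 (q : String → Bool) (w1 w2 w3 w4 w5 : String) :
    ([w1, w2, w3, w4, w5].filter q).length
    = PySem.Int.bitCount ((m5 (q w1) (q w2) (q w3) (q w4) (q w5) : Nat) : Int) := by
  cases h1 : q w1 <;> cases h2 : q w2 <;> cases h3 : q w3 <;> cases h4 : q w4 <;>
    cases h5 : q w5 <;>
      simp [h1, h2, h3, h4, h5, m5] <;> decide

lemma mask_cast (l : List String) :
    l.foldl (fun a x =>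
      PySem.Int.bor a (PySem.Dict.getD KEYWORD_MASK (PySem.Str.lower (PySem.Str.strip x)) 0)) (0 : Int)
    = ((natMask l : Nat) : Int) := by
  simpa using mask_cast_aux l 0

lemma bandInt63 (l : List String) :
    PySem.Int.band ((natMask l : Nat) : Int) 63
    = ((m6 (hits l "trunk") (hits l "back_bumper") (hits l "tailgate")
        (hits l "back_left_light") (hits l "back_right_light") (hits l "back_glass") : Nat) : Int) := by
  rw [show (63 : Int) = ((63 : Nat) : Int) from rfl, PySem.Int.band_natCast, band63]

lemma bandInt31 (l : List String) :
    PySem.Int.band (((natMask l : Nat) : Int) >>> (6 : Nat)) 31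
    = ((m5 (hits l "hood") (hits l "front_bumper") (hits l "front_left_light")
        (hits l "front_right_light") (hits l "front_glass") : Nat) : Int) := by
  rw [cast_shiftRight, show (31 : Int) = ((31 : Nat) : Int) from rfl, PySem.Int.band_natCast, band31]

lemma bandInt1 (l : List String) (k : Nat) (kw : String)
    (h : (natMask l).testBit k = hits l kw) :
    PySem.Int.band (((natMask l : Nat) : Int) >>> (k : Nat)) 1
    = ((cond (hits l kw) 1 0 : Nat) : Int) := by
  rw [cast_shiftRight, show (1 : Int) = ((1 : Nat) : Int) from rfl, PySem.Int.band_natCast,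
    band1 l k kw h]

lemma chain (r f : Nat) (bl br : Bool) :
    (if 2 ≤ (r : Int) ∧ (f : Int) < (r : Int) then "rear"
     else if 2 ≤ (f : Int) ∧ (r : Int) < (f : Int) then "front"
     else if (if bl = true then (1 : Int) else 0) = 1 ∧ (if br = true then (1 : Int) else 0) = 0 then "left"
     else if (if br = true then (1 : Int) else 0) = 1 ∧ (if bl = true then (1 : Int) else 0) = 0 then "right"
     else "unknown")
    = (if 2 ≤ max r f ∧ r ≠ f then (if f < r then "rear" else "front")
       else if ((cond bl 1 0 : Nat) : Int) ≠ ((cond br 1 0 : Nat) : Int) then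
         (if ((cond bl 1 0 : Nat) : Int) ≠ 0 then "left" else "right")
       else "unknown") := by
  cases bl <;> cases br <;>
    simp only [cond_true, cond_false] <;> split_ifs <;> first | rfl | (exfalso; omega)

-- ===== VERDICT (by name: the statement is the Claim_ definition above) =====
theorem orientation_from_parts_spec : Claim_equal_orientation_from_parts := by
  intro parts _
  unfold Spec_orientation_from_parts
  show orientation_from_parts parts = orientation_from_parts_alt parts
  simp only [orientation_from_parts, orientation_from_parts_alt]
  rw [PySem.Set.ofList_eq_self_of_nodup (["trunk", "back_bumper", "tailgate", "back_left_light", "back_right_light", "back_glass"] : List String) (by decide)]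
  rw [PySem.Set.ofList_eq_self_of_nodup (["hood", "front_bumper", "front_left_light", "front_right_light", "front_glass"] : List String) (by decide)]
  rw [mask_cast parts]
  rw [bandInt63 parts, bandInt31 parts, bandInt1 parts 11 "left_mirror" (maskBit11 parts),
    bandInt1 parts 12 "right_mirror" (maskBit12 parts)]
  simp only [contains_ofList_map]
  rw [len6 (fun k => parts.any (fun x => PySem.Str.lower (PySem.Str.strip x) == k)) "trunk" "back_bumper" "tailgate" "back_left_light" "back_right_light" "back_glass"]
  rw [len5 (fun k => parts.any (fun x => PySem.Str.lower (PySem.Str.strip x) == k)) "hood" "front_bumper" "front_left_light" "front_right_light" "front_glass"]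
  simp only [hits]
  exact chain _ _ _ _
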